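-- pv_equiv track=rewrite | github.com/grgong/pie | src/pie/reference.py | codon_genomic_positions
-- ===== SOURCE A (Python) =====
-- def codon_genomic_positions(
--     exons: list[tuple[str, int, int]], strand: str
-- ) -> list[tuple[str, int, int, int]]:
--     """Map codon indices to genomic positions.
--
--     Returns: [(chrom, pos1, pos2, pos3), ...] where pos are 0-based genomic.
--     """
--     bases: list[tuple[str, int]] = []
--     for chrom, start, end in exons:
--         for pos in range(start, end):
--             bases.append((chrom, pos))
--     if strand == "-":
--         bases = bases[::-1]
--     n_complete = (len(bases) // 3) * 3
--     bases = bases[:n_complete]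
--     codons = []
--     for i in range(0, len(bases), 3):
--         chrom = bases[i][0]
--         codons.append((chrom, bases[i][1], bases[i + 1][1], bases[i + 2][1]))
--     return codons
-- ===== SOURCE B (Python) =====
-- def codon_genomic_positions(
--     exons: list[tuple[str, int, int]], strand: str
-- ) -> list[tuple[str, int, int, int]]:
--     """Map codon indices to genomic positions.
--
--     Returns: [(chrom, pos1, pos2, pos3), ...] where pos are 0-based genomic.
--     """
--     minus = strand == "-"
--     codons: list[tuple[str, int, int, int]] = []
--     buf: list[tuple[str, int]] = []
--     for chrom, start, end in (reversed(exons) if minus else exons):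
--         positions = list(range(start, end))
--         if minus:
--             positions.reverse()
--         for pos in positions:
--             buf.append((chrom, pos))
--             if len(buf) == 3:
--                 codons.append((buf[0][0], buf[0][1], buf[1][1], buf[2][1]))
--                 buf = []
--     return codons
-- ===== Notes on version B (the rewrite author's own statement) =====
-- stated objective: alternative
-- what changed: Instead of materialising one global flat base list, reversing and truncating it, and indexing triples with a step-3 range loop, B streams bases exon by exon (forward for '+', fully reversed exon and within-exon order for '-') through a 3-element buffer and emits a codon whenever the buffer fills; a partial trailing buffer is simply never emitted, which replaces A's explicit floor-division truncation.
import Mathlib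
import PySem

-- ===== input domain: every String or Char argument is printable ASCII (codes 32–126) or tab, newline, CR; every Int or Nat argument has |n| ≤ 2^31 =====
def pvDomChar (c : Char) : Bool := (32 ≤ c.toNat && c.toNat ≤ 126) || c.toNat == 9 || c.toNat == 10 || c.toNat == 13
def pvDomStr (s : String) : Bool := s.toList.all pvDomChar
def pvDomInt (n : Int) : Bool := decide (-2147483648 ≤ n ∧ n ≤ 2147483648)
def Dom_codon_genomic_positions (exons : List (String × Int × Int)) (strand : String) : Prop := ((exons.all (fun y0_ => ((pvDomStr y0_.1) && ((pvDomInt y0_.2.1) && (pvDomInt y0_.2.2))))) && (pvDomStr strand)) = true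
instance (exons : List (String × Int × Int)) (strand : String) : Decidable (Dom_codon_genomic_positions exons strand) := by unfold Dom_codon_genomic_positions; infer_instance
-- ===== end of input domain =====

-- B streams bases exon by exon through a 3-element buffer (fully reversed exon and
-- within-exon order for '-') instead of materialising, reversing, truncating and
-- step-3-indexing one global flat base list; same result, different decomposition.

-- ===== PORT A =====
def codon_genomic_positions (exons : List (String × Int × Int)) (strand : String) : List (String × Int × Int × Int) :=
  let bases : List (String × Int) :=
    exons.foldl (fun bs e =>
      (PySem.List.pyRange e.2.1 e.2.2 1).foldl (fun bs p => bs ++ [(e.1, p)]) bs) []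
  let bases := if strand == "-" then (PySem.List.slice? bases none none (-1)).getD [] else bases
  let n_complete : Int := PySem.Int.floordiv (bases.length : Int) 3 * 3
  let bases := PySem.List.slice bases none (some n_complete)
  (PySem.List.pyRange 0 (bases.length : Int) 3).foldl
    (fun cs i =>
      let chrom := (PySem.List.pyGetD bases i ("", 0)).1
      cs ++ [(chrom, (PySem.List.pyGetD bases i ("", 0)).2,
              (PySem.List.pyGetD bases (i + 1) ("", 0)).2,
              (PySem.List.pyGetD bases (i + 2) ("", 0)).2)]) []

-- ===== PORT B =====
def pvStepB (st : (List (String × Int × Int × Int)) × (List (String × Int))) (b : String × Int) :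
    (List (String × Int × Int × Int)) × (List (String × Int)) :=
  let buf := st.2 ++ [b]
  if buf.length = 3 then
    (st.1 ++ [((PySem.List.pyGetD buf 0 ("", 0)).1, (PySem.List.pyGetD buf 0 ("", 0)).2,
               (PySem.List.pyGetD buf 1 ("", 0)).2, (PySem.List.pyGetD buf 2 ("", 0)).2)],
     ([] : List (String × Int)))
  else (st.1, buf)

def codon_genomic_positions_alt (exons : List (String × Int × Int)) (strand : String) : List (String × Int × Int × Int) :=
  let minus := strand == "-"
  let st := (if minus then exons.reverse else exons).foldl
    (fun st e =>
      let positions := PySem.List.pyRange e.2.1 e.2.2 1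
      let positions := if minus then positions.reverse else positions
      positions.foldl (fun st p => pvStepB st (e.1, p)) st)
    ([], [])
  st.1

-- ===== PRECONDITION & SPEC =====
def Spec_codon_genomic_positions (exons : List (String × Int × Int)) (strand : String) (out : List (String × Int × Int × Int)) : Prop := out = codon_genomic_positions_alt exons strand
instance (exons : List (String × Int × Int)) (strand : String) (out : List (String × Int × Int × Int)) : Decidable (Spec_codon_genomic_positions exons strand out) := by unfold Spec_codon_genomic_positions; infer_instance

-- ===== CLAIM (what is proved, stated in full; the proofs are below) =====
def Claim_equal_codon_genomic_positions : Prop := ∀ (exons : List (String × Int × Int)) (strand : String), Dom_codon_genomic_positions exons strand → Spec_codon_genomic_positions exons strand (codon_genomic_positions exons strand)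

-- ===== LEMMAS AND PROOFS =====

/-- Group a base list into complete triples, dropping a partial tail. -/
def pvChunk3 : List (String × Int) → List (String × Int × Int × Int)
  | [] => []
  | [_] => []
  | [_, _] => []
  | a :: b :: c :: r => (a.1, a.2, b.2, c.2) :: pvChunk3 r

/-- The flat base list both programs traverse (forward orientation). -/
def pvBases (exons : List (String × Int × Int)) : List (String × Int) :=
  exons.flatMap (fun e => (PySem.List.pyRange e.2.1 e.2.2 1).map (fun p => (e.1, p)))

theorem pvBasesA_eq (exons : List (String × Int × Int)) :
    exons.foldl (fun bs e =>
      (PySem.List.pyRange e.2.1 e.2.2 1).foldl (fun bs p => bs ++ [(e.1, p)]) bs) [] =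
    pvBases exons := by
  refine (PySem.List.foldl_congr_mem _ _
    (fun bs e => bs ++ (PySem.List.pyRange e.2.1 e.2.2 1).map (fun p => (e.1, p))) _ ?_).trans ?_
  · intro acc x _
    exact PySem.List.foldl_append_singleton_eq_map _ _ _
  · simpa [pvBases] using PySem.List.foldl_append_eq_flatMap
      (fun e => (PySem.List.pyRange e.2.1 e.2.2 1).map (fun p => (e.1, p))) exons []

theorem pvFoldl_flatMap {α β γ : Type} (l : List α) (g : α → List β) (f : γ → β → γ) (init : γ) :
    (l.flatMap g).foldl f init = l.foldl (fun st x => (g x).foldl f st) init := by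
  induction l generalizing init with
  | nil => rfl
  | cons x xs ih => simp [List.flatMap_cons, List.foldl_append, ih]

theorem pvStream_chunk3 (bs : List (String × Int)) (acc : List (String × Int × Int × Int)) :
    (bs.foldl pvStepB (acc, ([] : List (String × Int)))).1 = acc ++ pvChunk3 bs := by
  induction bs using pvChunk3.induct generalizing acc with
  | case1 => simp [pvChunk3]
  | case2 a => simp [pvChunk3, pvStepB]
  | case3 a b => simp [pvChunk3, pvStepB]
  | case4 a b c r ih =>
      simp only [List.foldl_cons]
      have h1 : pvStepB (acc, []) a = (acc, [a]) := by simp [pvStepB]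
      have h2 : pvStepB (acc, [a]) b = (acc, [a, b]) := by simp [pvStepB]
      have h3 : pvStepB (acc, [a, b]) c = (acc ++ [(a.1, a.2, b.2, c.2)], []) := by
        simp [pvStepB, PySem.List.pyGetD_ofNat']
      rw [h1, h2, h3, ih]
      simp [pvChunk3]

theorem pvRange3_succ (n : Nat) :
    PySem.List.pyRange 0 ((n : Int) + 3) 3 = 0 :: (PySem.List.pyRange 0 (n : Int) 3).map (· + 3) := by
  rw [PySem.List.pyRange_of_pos _ _ (by norm_num : (0:Int) < 3),
      PySem.List.pyRange_of_pos _ _ (by norm_num : (0:Int) < 3)]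
  have hc : (if (0:Int) < (n : Int) + 3 then (((n : Int) + 3 - 0 + 3 - 1) / 3).toNat else 0) =
      (if (0:Int) < (n : Int) then (((n : Int) - 0 + 3 - 1) / 3).toNat else 0) + 1 := by
    split_ifs <;> omega
  rw [hc, List.range_succ_eq_map]
  simp only [List.map_cons, List.map_map]
  congr 1

theorem pvGetD_cons_succ (x : String × Int) (xs : List (String × Int)) (i : Int) (h : 0 ≤ i) (d : String × Int) :
    PySem.List.pyGetD (x :: xs) (i + 1) d = PySem.List.pyGetD xs i d := by
  obtain ⟨n, rfl⟩ := Int.eq_ofNat_of_zero_le h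
  rw [show ((n : Int) + 1) = ((n + 1 : Nat) : Int) by push_cast; ring]
  rw [PySem.List.pyGetD_natCast, PySem.List.pyGetD_natCast]
  simp [List.getD]

theorem pvGetD_cons3 (a b c : String × Int) (xs : List (String × Int)) (i : Int) (h : 0 ≤ i) (d : String × Int) :
    PySem.List.pyGetD (a :: b :: c :: xs) (i + 3) d = PySem.List.pyGetD xs i d := by
  rw [show i + 3 = (i + 2) + 1 by ring, pvGetD_cons_succ _ _ _ (by omega),
      show i + 2 = (i + 1) + 1 by ring, pvGetD_cons_succ _ _ _ (by omega),
      pvGetD_cons_succ _ _ _ h]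

theorem pvIdxLoop (bs : List (String × Int)) (cs : List (String × Int × Int × Int))
    (h : bs.length % 3 = 0) :
    (PySem.List.pyRange 0 (bs.length : Int) 3).foldl
      (fun cs i =>
        cs ++ [((PySem.List.pyGetD bs i ("", 0)).1, (PySem.List.pyGetD bs i ("", 0)).2,
                (PySem.List.pyGetD bs (i + 1) ("", 0)).2,
                (PySem.List.pyGetD bs (i + 2) ("", 0)).2)]) cs = cs ++ pvChunk3 bs := by
  induction bs using pvChunk3.induct generalizing cs with
  | case1 =>
      rw [PySem.List.pyRange_of_pos _ _ (by norm_num : (0:Int) < 3)]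
      simp [pvChunk3]
  | case2 a => simp at h
  | case3 a b => simp at h
  | case4 a b c r ih =>
      have hr : r.length % 3 = 0 := by simp only [List.length_cons] at h; omega
      have hl : (((a :: b :: c :: r).length : Nat) : Int) = (r.length : Int) + 3 := by
        simp only [List.length_cons]; push_cast; ring
      rw [hl, pvRange3_succ, List.foldl_cons, List.foldl_map]
      have hhead : cs ++ [((PySem.List.pyGetD (a :: b :: c :: r) 0 ("", 0)).1,
            (PySem.List.pyGetD (a :: b :: c :: r) 0 ("", 0)).2,
            (PySem.List.pyGetD (a :: b :: c :: r) (0 + 1) ("", 0)).2,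
            (PySem.List.pyGetD (a :: b :: c :: r) (0 + 2) ("", 0)).2)]
          = cs ++ [(a.1, a.2, b.2, c.2)] := by
        norm_num [PySem.List.pyGetD_ofNat', List.getD]
      rw [hhead]
      rw [PySem.List.foldl_congr_mem _ _
        (fun cs i =>
          cs ++ [((PySem.List.pyGetD r i ("", 0)).1, (PySem.List.pyGetD r i ("", 0)).2,
                  (PySem.List.pyGetD r (i + 1) ("", 0)).2,
                  (PySem.List.pyGetD r (i + 2) ("", 0)).2)]) _ ?_]
      · rw [ih _ hr]
        simp [pvChunk3]
      · intro acc i hi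
        have h0 : 0 ≤ i := ((PySem.List.mem_pyRange_iff_of_pos (by norm_num) i).1 hi).1
        rw [show i + 3 + 1 = (i + 1) + 3 by ring, show i + 3 + 2 = (i + 2) + 3 by ring,
            pvGetD_cons3 _ _ _ _ _ h0, pvGetD_cons3 _ _ _ _ _ (by omega),
            pvGetD_cons3 _ _ _ _ _ (by omega)]

theorem pvChunk3_take (bs : List (String × Int)) :
    pvChunk3 (bs.take (bs.length / 3 * 3)) = pvChunk3 bs := by
  induction bs using pvChunk3.induct with
  | case1 => simp [pvChunk3]
  | case2 a => simp [pvChunk3]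
  | case3 a b => simp [pvChunk3]
  | case4 a b c r ih =>
      have hl : (a :: b :: c :: r).length / 3 * 3 = r.length / 3 * 3 + 3 := by
        simp only [List.length_cons]; omega
      rw [hl]
      simp only [List.take_succ_cons]
      simp [pvChunk3, ih]

theorem pvACore (bs : List (String × Int)) :
    (PySem.List.pyRange 0
        (((PySem.List.slice bs none (some (PySem.Int.floordiv ((bs.length : Nat) : Int) 3 * 3))).length : Nat) : Int) 3).foldl
      (fun cs i =>
        cs ++ [((PySem.List.pyGetD (PySem.List.slice bs none (some (PySem.Int.floordiv ((bs.length : Nat) : Int) 3 * 3))) i ("", 0)).1,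
                (PySem.List.pyGetD (PySem.List.slice bs none (some (PySem.Int.floordiv ((bs.length : Nat) : Int) 3 * 3))) i ("", 0)).2,
                (PySem.List.pyGetD (PySem.List.slice bs none (some (PySem.Int.floordiv ((bs.length : Nat) : Int) 3 * 3))) (i + 1) ("", 0)).2,
                (PySem.List.pyGetD (PySem.List.slice bs none (some (PySem.Int.floordiv ((bs.length : Nat) : Int) 3 * 3))) (i + 2) ("", 0)).2)])
      [] = pvChunk3 bs := by
  have hn : PySem.Int.floordiv ((bs.length : Nat) : Int) 3 * 3 = ((bs.length / 3 * 3 : Nat) : Int) := by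
    rw [show (3 : Int) = ((3 : Nat) : Int) by norm_num, PySem.Int.floordiv_natCast]
    push_cast; ring
  rw [hn, PySem.List.slice_to_natCast]
  have hlen : (bs.take (bs.length / 3 * 3)).length % 3 = 0 := by
    rw [List.length_take]; omega
  rw [pvIdxLoop _ _ hlen, pvChunk3_take, List.nil_append]

theorem pvBFold (exs : List (String × Int × Int)) (posf : (String × Int × Int) → List Int)
    (init : (List (String × Int × Int × Int)) × (List (String × Int))) :
    exs.foldl (fun st e => (posf e).foldl (fun st p => pvStepB st (e.1, p)) st) init
      = (exs.flatMap (fun e => (posf e).map (fun p => (e.1, p)))).foldl pvStepB init := by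
  rw [pvFoldl_flatMap]
  apply PySem.List.foldl_congr_mem
  intro st e _
  rw [List.foldl_map]

theorem pvBasesRev (exons : List (String × Int × Int)) :
    exons.reverse.flatMap (fun e => (PySem.List.pyRange e.2.1 e.2.2 1).reverse.map (fun p => (e.1, p)))
      = (pvBases exons).reverse := by
  rw [pvBases, List.reverse_flatMap]
  simp [Function.comp_def, List.map_reverse]

-- ===== VERDICT (by name: the statement is the Claim_ definition above) =====
theorem codon_genomic_positions_spec : Claim_equal_codon_genomic_positions := by
  intro exons strand _
  unfold Spec_codon_genomic_positions
  simp only [codon_genomic_positions, codon_genomic_positions_alt]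
  rw [pvBasesA_eq]
  cases hs : strand == "-" with
  | false =>
      simp only [Bool.false_eq_true, if_false]
      rw [pvACore, pvBFold, ← pvBases, pvStream_chunk3, List.nil_append]
  | true =>
      simp only [if_true]
      rw [PySem.List.slice?_none_none_neg_one, Option.getD_some]
      rw [pvACore, pvBFold, pvBasesRev, pvStream_chunk3, List.nil_append]
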